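-- pv_equiv track=rewrite | github.com/mifoxti/Python_Mirea_Tasks | Prac_2/8/3.py | process_quotes
-- ===== SOURCE A (Python) =====
-- def process_quotes(line):
--     inside_code_block = False
--     processed_line = ""
--
--     for char in line:
--         if char == '`':
--             inside_code_block = not inside_code_block
--
--         if not inside_code_block and char == '"':
--             processed_line += '“' if len(processed_line) % 2 == 0 else '”'
--         else:
--             processed_line += char
--
--     return processed_line
-- ===== SOURCE B (Python) =====
-- def process_quotes(line):
--     # Split on backticks: even-indexed segments are outside code spans.
--     parts = line.split('`')
--     pieces = []
--     pos = 0  # global 0-based index of the first char of the current segment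
--     for k, part in enumerate(parts):
--         if k % 2 == 0:
--             pieces.append(''.join(
--                 (('\u201c' if (pos + j) % 2 == 0 else '\u201d') if c == '"' else c)
--                 for j, c in enumerate(part)))
--         else:
--             pieces.append(part)
--         pos += len(part) + 1  # +1 for the backtick that followed this segment
--     return '`'.join(pieces)
-- ===== Notes on version B (the rewrite author's own statement) =====
-- stated objective: alternative
-- what changed: Replaces A's single character scan with a toggle flag by splitting the line on backticks, curly-quoting only the even-indexed (outside-code) segments with a running global offset for the index parity, and re-joining with backticks.
import Mathlib
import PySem

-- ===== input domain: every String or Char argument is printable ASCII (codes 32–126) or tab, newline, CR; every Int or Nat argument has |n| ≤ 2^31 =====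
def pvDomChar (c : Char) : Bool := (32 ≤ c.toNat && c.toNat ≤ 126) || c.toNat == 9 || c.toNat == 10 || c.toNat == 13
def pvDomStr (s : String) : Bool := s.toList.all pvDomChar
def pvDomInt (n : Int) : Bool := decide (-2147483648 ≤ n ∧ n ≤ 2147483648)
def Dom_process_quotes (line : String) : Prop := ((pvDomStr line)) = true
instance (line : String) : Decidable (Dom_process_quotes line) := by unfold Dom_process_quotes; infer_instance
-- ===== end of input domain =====

-- B replaces A's character scan with a toggle flag by splitting on backticks and
-- transforming only the even-indexed (outside-code) segments; alternative decomposition, same results.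

-- ===== PORT A =====
-- A's loop: state = (inside_code_block, processed_line as List Char); one char appended per step.
def pvALoop : List Char → Bool → List Char → List Char
  | [], _, acc => acc
  | c :: cs, ins, acc =>
    let ins' := if c = '`' then !ins else ins
    let out := if ¬ins' ∧ c = '"' then (if acc.length % 2 = 0 then '“' else '”') else c
    pvALoop cs ins' (acc ++ [out])

def process_quotes (line : String) : String :=
  String.ofList (pvALoop line.toList false [])

-- ===== PORT B =====
-- Source B's inner genexpr over enumerate(part): curly quote by global (pos + j) parity.
def pvSeg (pos : Nat) (part : List Char) : List Char :=
  part.mapIdx (fun j c => if c = '"' then (if (pos + j) % 2 = 0 then '“' else '”') else c)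

-- Source B's main loop: state = (pieces, pos); enumerate over the split parts.
def pvBStep (st : List (List Char) × Nat) (kp : Int × List Char) : List (List Char) × Nat :=
  let piece := if PySem.Int.mod kp.1 2 = 0 then pvSeg st.2 kp.2 else kp.2
  (st.1 ++ [piece], st.2 + kp.2.length + 1)

def process_quotes_alt (line : String) : String :=
  let parts := PySem.Chars.splitOn line.toList ['`']
  let st := (PySem.List.enumerate parts 0).foldl pvBStep ([], 0)
  String.ofList (PySem.Chars.join ['`'] st.1)

-- ===== PRECONDITION & SPEC =====
def Spec_process_quotes (line : String) (out : String) : Prop := out = process_quotes_alt line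
instance (line : String) (out : String) : Decidable (Spec_process_quotes line out) := by unfold Spec_process_quotes; infer_instance

-- ===== CLAIM (what is proved, stated in full; the proofs are below) =====
def Claim_equal_process_quotes : Prop := ∀ (line : String), Dom_process_quotes line → Spec_process_quotes line (process_quotes line)

-- ===== LEMMAS AND PROOFS =====

-- proof-side recursive split on '`'
def pvSplit : List Char → List Char → List (List Char)
  | cur, [] => [cur]
  | cur, c :: rest => if c = '`' then cur :: pvSplit [] rest else pvSplit (cur ++ [c]) rest

-- proof-side recursive reading of pvSeg
def pvSegR : Nat → List Char → List Char
  | _, [] => []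
  | pos, c :: cs => (if c = '"' then (if pos % 2 = 0 then '“' else '”') else c) :: pvSegR (pos + 1) cs

theorem pvSegR_eq (part : List Char) : ∀ (pos : Nat), pvSegR pos part = pvSeg pos part := by
  induction part with
  | nil => intro pos; simp [pvSegR, pvSeg]
  | cons c cs ih =>
    intro pos
    simp only [pvSegR, pvSeg, List.mapIdx_cons, ih (pos + 1)]
    refine congrArg₂ List.cons (by simp) ?_
    congr 1
    funext j c'
    have h : pos + 1 + j = pos + (j + 1) := by omega
    rw [h]

-- proof-side joined result over the part list: out = outside-code flag, pos = global index
def pvG : List (List Char) → Bool → Nat → List Char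
  | [], _, _ => []
  | [p], out, pos => if out then pvSegR pos p else p
  | p :: q :: ps, out, pos =>
    (if out then pvSegR pos p else p) ++ '`' :: pvG (q :: ps) (!out) (pos + p.length + 1)

theorem splitOn_go_eq (sep : List Char) (hsep : sep = ['`']) :
    ∀ (fuel : Nat) (s cur : List Char) (acc : List (List Char)), s.length < fuel →
      PySem.Chars.splitOn.go sep fuel s cur acc = acc.reverse ++ pvSplit cur.reverse s := by
  subst hsep
  intro fuel
  induction fuel with
  | zero => intro s cur acc h; omega
  | succ fuel ih =>
    intro s cur acc h
    cases s with
    | nil => simp [PySem.Chars.splitOn.go, pvSplit]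
    | cons c rest =>
      by_cases hc : c = '`'
      · subst hc
        rw [PySem.Chars.splitOn.go]
        simp only [List.isPrefixOf, Bool.and_true, beq_self_eq_true, if_pos, List.length_cons,
          List.drop_succ_cons]
        simp only [List.length_nil, List.drop_zero]
        rw [ih rest [] (List.cons (List.reverse cur) acc) (by simpa using Nat.lt_of_succ_lt_succ h)]
        simp [pvSplit]
      · rw [PySem.Chars.splitOn.go]
        have hpre : List.isPrefixOf ['`'] (c :: rest) = false := by
          simp [List.isPrefixOf]
          exact fun h' => hc h'.symm
        simp only [hpre, Bool.false_eq_true, if_false]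
        rw [ih rest (c :: cur) acc (by simpa using Nat.lt_of_succ_lt_succ h)]
        simp [pvSplit, hc]

theorem splitOn_eq (s : List Char) : PySem.Chars.splitOn s ['`'] = pvSplit [] s := by
  have := splitOn_go_eq ['`'] rfl (s.length + 1) s [] [] (by omega)
  simpa [PySem.Chars.splitOn] using this

theorem pvSplit_ne_nil : ∀ (s cur : List Char), pvSplit cur s ≠ [] := by
  intro s
  induction s with
  | nil => intro cur; simp [pvSplit]
  | cons c rest ih =>
    intro cur
    by_cases hc : c = '`' <;> simp [pvSplit, hc, ih]

theorem pvSegR_length : ∀ (p : List Char) (pos : Nat), (pvSegR pos p).length = p.length := by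
  intro p
  induction p with
  | nil => intro pos; simp [pvSegR]
  | cons c cs ih => intro pos; simp [pvSegR, ih]

theorem join_pvSplit : ∀ (s cur : List Char), PySem.Chars.join ['`'] (pvSplit cur s) = cur ++ s := by
  intro s
  induction s with
  | nil => intro cur; simp [pvSplit, PySem.Chars.join_singleton]
  | cons c rest ih =>
    intro cur
    by_cases hc : c = '`'
    · subst hc
      obtain ⟨h, t, ht⟩ : ∃ h t, pvSplit ([] : List Char) rest = h :: t := by
        cases hsp : pvSplit ([] : List Char) rest with
        | nil => exact absurd hsp (pvSplit_ne_nil rest [])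
        | cons h t => exact ⟨h, t, rfl⟩
      rw [show pvSplit cur ('`' :: rest) = cur :: pvSplit [] rest from by simp [pvSplit]]
      rw [ht, PySem.Chars.join_cons_cons, ← ht, ih []]
      simp
    · simp only [pvSplit, if_neg hc, ih (cur ++ [c])]
      simp

theorem pvSplit_no_tick : ∀ (s cur : List Char), '`' ∉ cur → ∀ p ∈ pvSplit cur s, '`' ∉ p := by
  intro s
  induction s with
  | nil => intro cur hcur p hp; simp [pvSplit] at hp; simpa [hp] using hcur
  | cons c rest ih =>
    intro cur hcur p hp
    by_cases hc : c = '`'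
    · subst hc
      rw [show pvSplit cur ('`' :: rest) = cur :: pvSplit [] rest from by simp [pvSplit]] at hp
      rcases List.mem_cons.1 hp with hp1 | hp1
      · simpa [hp1] using hcur
      · exact ih [] (by simp) p hp1
    · rw [show pvSplit cur (c :: rest) = pvSplit (cur ++ [c]) rest from by simp [pvSplit, hc]] at hp
      refine ih (cur ++ [c]) ?_ p hp
      intro hmem
      rcases List.mem_append.1 hmem with h1 | h1
      · exact hcur h1
      · have hce : ('`' : Char) = c := by simpa using h1
        exact hc hce.symm


theorem aloop_out (p : List Char) (hp : '`' ∉ p) :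
    ∀ (acc ys : List Char), pvALoop (p ++ ys) false acc = pvALoop ys false (acc ++ pvSegR acc.length p) := by
  induction p with
  | nil => intro acc ys; simp [pvSegR]
  | cons c cs ih =>
    intro acc ys
    have hc : c ≠ '`' := fun h => hp (by simp [h])
    have hcs : '`' ∉ cs := fun h => hp (by simp [h])
    simp only [List.cons_append, pvALoop, if_neg hc]
    rw [ih hcs (acc ++ [_]) ys]
    simp [pvSegR]

theorem aloop_in (p : List Char) (hp : '`' ∉ p) :
    ∀ (acc ys : List Char), pvALoop (p ++ ys) true acc = pvALoop ys true (acc ++ p) := by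
  induction p with
  | nil => intro acc ys; simp
  | cons c cs ih =>
    intro c0 ys
    have hc : c ≠ '`' := fun h => hp (by simp [h])
    have hcs : '`' ∉ cs := fun h => hp (by simp [h])
    simp only [List.cons_append, pvALoop, if_neg hc, not_true, false_and, if_false]
    rw [ih hcs (c0 ++ [c]) ys]
    simp

theorem aloop_join (parts : List (List Char)) (h : ∀ p ∈ parts, '`' ∉ p) :
    ∀ (ins : Bool) (acc : List Char),
      pvALoop (PySem.Chars.join ['`'] parts) ins acc = acc ++ pvG parts (!ins) acc.length := by
  induction parts with
  | nil => intro ins acc; simp [PySem.Chars.join_nil, pvALoop, pvG]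
  | cons p ps ih =>
    have hp : '`' ∉ p := h p (by simp)
    have hps : ∀ q ∈ ps, '`' ∉ q := fun q hq => h q (by simp [hq])
    intro ins acc
    cases ps with
    | nil =>
      rw [PySem.Chars.join_singleton]
      cases ins
      · have := aloop_out p hp acc []
        simpa [pvG] using this
      · have := aloop_in p hp acc []
        simpa [pvG] using this
    | cons q qs =>
      rw [PySem.Chars.join_cons_cons]
      cases ins
      · rw [List.append_assoc, aloop_out p hp acc (['`'] ++ PySem.Chars.join ['`'] (q :: qs))]
        rw [show (['`'] ++ PySem.Chars.join ['`'] (q :: qs)) = '`' :: PySem.Chars.join ['`'] (q :: qs) from rfl]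
        rw [show pvALoop ('`' :: PySem.Chars.join ['`'] (q :: qs)) false ((acc ++ pvSegR acc.length p))
              = pvALoop (PySem.Chars.join ['`'] (q :: qs)) true ((acc ++ pvSegR acc.length p) ++ ['`'])
            from by simp [pvALoop]]
        rw [ih hps true ((acc ++ pvSegR acc.length p) ++ ['`'])]
        simp only [pvG, pvSegR_length, List.append_assoc, List.length_append, List.length_cons,
          List.length_nil, Bool.not_true, List.cons_append, List.nil_append]
        rw [show acc.length + (p.length + 1) = acc.length + p.length + 1 from by omega]
        simp
      · rw [List.append_assoc, aloop_in p hp acc (['`'] ++ PySem.Chars.join ['`'] (q :: qs))]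
        rw [show (['`'] ++ PySem.Chars.join ['`'] (q :: qs)) = '`' :: PySem.Chars.join ['`'] (q :: qs) from rfl]
        rw [show pvALoop ('`' :: PySem.Chars.join ['`'] (q :: qs)) true ((acc ++ p))
              = pvALoop (PySem.Chars.join ['`'] (q :: qs)) false ((acc ++ p) ++ ['`'])
            from by simp [pvALoop]]
        rw [ih hps false ((acc ++ p) ++ ['`'])]
        simp only [pvG, List.append_assoc, List.length_append, List.length_cons,
          List.length_nil, Bool.not_false, List.cons_append, List.nil_append]
        rw [show acc.length + (p.length + 1) = acc.length + p.length + 1 from by omega]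
        simp

-- B's fold over an enumerated list, read recursively with the running position
def pvPList : List (Int × List Char) → Nat → List (List Char)
  | [], _ => []
  | (k, p) :: rest, pos =>
    (if PySem.Int.mod k 2 = 0 then pvSeg pos p else p) :: pvPList rest (pos + p.length + 1)

theorem bfold_eq (l : List (Int × List Char)) :
    ∀ (pieces : List (List Char)) (pos : Nat),
      (l.foldl pvBStep (pieces, pos)).1 = pieces ++ pvPList l pos := by
  induction l with
  | nil => intro pieces pos; simp [pvPList]
  | cons kp rest ih =>
    intro pieces pos
    obtain ⟨k, p⟩ := kp
    simp only [List.foldl_cons, pvBStep, pvPList, ih]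
    simp

theorem join_cons_of_ne_nil (sep a : List Char) (L : List (List Char)) (h : L ≠ []) :
    PySem.Chars.join sep (a :: L) = a ++ sep ++ PySem.Chars.join sep L := by
  cases L with
  | nil => exact absurd rfl h
  | cons b t => exact PySem.Chars.join_cons_cons sep a b t

theorem join_pvPList (parts : List (List Char)) :
    ∀ (k : Nat) (pos : Nat),
      PySem.Chars.join ['`'] (pvPList (PySem.List.enumerate parts (k : Int)) pos)
        = pvG parts (decide (k % 2 = 0)) pos := by
  induction parts with
  | nil => intro k pos; simp [PySem.List.enumerate_nil, pvPList, pvG, PySem.Chars.join_nil]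
  | cons p ps ih =>
    intro k pos
    rw [PySem.List.enumerate_cons]
    have hmod : PySem.Int.mod (k : Int) 2 = 0 ↔ k % 2 = 0 := by
      rw [show PySem.Int.mod (k : Int) 2 = (k : Int) % 2 from by
        simp [PySem.Int.mod, Int.fmod_eq_emod]]
      omega
    cases ps with
    | nil =>
      simp only [PySem.List.enumerate_nil, pvPList, PySem.Chars.join_singleton]
      by_cases hk : k % 2 = 0
      · have hki : (k : Int) % 2 = 0 := by omega
        simp [pvG, hk, hki, ← pvSegR_eq]
      · have hki : (k : Int) % 2 = 1 := by omega
        simp [pvG, hk, hki]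
    | cons q qs =>
      have hne : pvPList (PySem.List.enumerate (q :: qs) ((k : Int) + 1)) (pos + p.length + 1) ≠ [] := by
        rw [PySem.List.enumerate_cons]
        simp [pvPList]
      simp only [pvPList]
      rw [join_cons_of_ne_nil _ _ _ hne]
      rw [show ((k : Int) + 1) = (((k + 1 : Nat)) : Int) from by push_cast; ring]
      rw [ih (k + 1) (pos + p.length + 1)]
      by_cases hk : k % 2 = 0
      · have hk1 : ¬ (k + 1) % 2 = 0 := by omega
        have hki : (k : Int) % 2 = 0 := by omega
        simp [pvG, hk, hk1, hki, ← pvSegR_eq]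
      · have hk1 : (k + 1) % 2 = 0 := by omega
        have hki : (k : Int) % 2 = 1 := by omega
        simp [pvG, hk, hk1, hki]

-- ===== VERDICT (by name: the statement is the Claim_ definition above) =====
theorem process_quotes_spec : Claim_equal_process_quotes := by
  intro line _
  unfold Spec_process_quotes process_quotes process_quotes_alt
  congr 1
  rw [splitOn_eq, bfold_eq]
  rw [show ((0 : Int)) = (((0 : Nat)) : Int) from rfl, List.nil_append]
  rw [join_pvPList (pvSplit [] line.toList) 0 0]
  have hparts : ∀ p ∈ pvSplit [] line.toList, '`' ∉ p :=
    pvSplit_no_tick line.toList [] (by simp)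
  conv_lhs => rw [show line.toList = PySem.Chars.join ['`'] (pvSplit [] line.toList) from
    (join_pvSplit line.toList []).symm]
  rw [aloop_join (pvSplit [] line.toList) hparts false []]
  simp
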